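-- pv_equiv track=rewrite | github.com/mattporritt/agentic_sitemap | src/moodle_sitemap/extract/dom.py | normalize_body_classes
-- ===== SOURCE A (Python) =====
-- def normalize_body_classes(values: list[str]) -> list[str]:
--     seen: set[str] = set()
--     normalized: list[str] = []
--     for value in values:
--         cleaned = " ".join((value or "").split())
--         if not cleaned or cleaned in seen:
--             continue
--         seen.add(cleaned)
--         normalized.append(cleaned)
--     return normalized
-- ===== SOURCE B (Python) =====
-- def normalize_body_classes(values: list[str]) -> list[str]:
--     # Head-and-eliminate: repeatedly emit the first pending cleaned string and
--     # drop every later duplicate of it from the remainder (no seen-set is kept).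
--     pending = [c for c in (" ".join((value or "").split()) for value in values) if c]
--     normalized: list[str] = []
--     while pending:
--         head = pending[0]
--         normalized.append(head)
--         pending = [c for c in pending if c != head]
--     return normalized
-- ===== Notes on version B (the rewrite author's own statement) =====
-- stated objective: alternative
-- what changed: Replaces the single-pass seen-set loop with a normalize/filter pass followed by a head-and-eliminate dedup loop that repeatedly emits the first pending string and filters its duplicates out of the remainder, keeping no seen structure.
import Mathlib
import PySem

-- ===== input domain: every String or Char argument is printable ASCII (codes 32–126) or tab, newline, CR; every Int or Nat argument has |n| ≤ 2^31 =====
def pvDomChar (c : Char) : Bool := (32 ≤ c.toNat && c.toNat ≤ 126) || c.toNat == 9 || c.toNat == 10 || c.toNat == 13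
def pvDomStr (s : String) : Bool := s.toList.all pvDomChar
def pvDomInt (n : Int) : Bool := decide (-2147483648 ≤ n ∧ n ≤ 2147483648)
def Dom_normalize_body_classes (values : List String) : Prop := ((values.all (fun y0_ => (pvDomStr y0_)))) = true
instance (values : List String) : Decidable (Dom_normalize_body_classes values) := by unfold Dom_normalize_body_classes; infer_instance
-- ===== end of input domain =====

-- B replaces A's single seen-set loop by a normalize/filter pass plus a head-and-eliminate
-- dedup loop (emit first pending string, filter its duplicates out of the remainder);
-- same result, genuinely different algorithm, not claimed faster.

-- ===== PORT A =====
-- cleaned = " ".join((value or "").split())  (for a str, `value or ""` is value itself)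
def pvCleaned (value : String) : String := PySem.Str.join " " (PySem.Str.split₀ value)

-- one iteration of A's loop body over the state (seen, normalized)
def pvStepA (st : PySem.Set String × List String) (value : String) :
    PySem.Set String × List String :=
  let cleaned := pvCleaned value
  if (cleaned == "") || PySem.Set.contains st.1 cleaned then st
  else (PySem.Set.add st.1 cleaned, st.2 ++ [cleaned])

def normalize_body_classes (values : List String) : List String :=
  (values.foldl pvStepA (PySem.Set.empty, [])).2

-- ===== PORT B =====
-- B's while loop: emit pending[0], keep only strings different from it, repeat.
def pvLoopB (normalized : List String) (pending : List String) : List String :=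
  match pending with
  | [] => normalized
  | head :: t =>
      pvLoopB (normalized ++ [head]) ((head :: t).filter (fun c => !(c == head)))
termination_by pending.length
decreasing_by
  simp only [List.filter_cons, beq_self_eq_true, Bool.not_true, List.length_cons]
  exact Nat.lt_succ_of_le (List.length_filter_le _ _)

def normalize_body_classes_alt (values : List String) : List String :=
  pvLoopB [] ((values.map pvCleaned).filter (fun c => !(c == "")))

-- ===== PRECONDITION & SPEC =====
def Spec_normalize_body_classes (values : List String) (out : List String) : Prop := out = normalize_body_classes_alt values
instance (values : List String) (out : List String) : Decidable (Spec_normalize_body_classes values out) := by unfold Spec_normalize_body_classes; infer_instance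

-- ===== CLAIM =====
def Claim_equal_normalize_body_classes : Prop := ∀ (values : List String), Dom_normalize_body_classes values → Spec_normalize_body_classes values (normalize_body_classes values)

-- ===== LEMMAS AND PROOFS =====

theorem pvStepA_skip (s : List String) (v : String)
    (h : ((pvCleaned v == "") || PySem.Set.contains s (pvCleaned v)) = true) :
    pvStepA (s, s) v = (s, s) := by
  simp only [pvStepA]
  split
  · rfl
  · rename_i hn
    exact absurd (by simpa using h) (by simpa using hn)

theorem pvStepA_add (s : List String) (v : String)
    (he : ¬ pvCleaned v = "") (hc : pvCleaned v ∉ s) :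
    pvStepA (s, s) v = (s ++ [pvCleaned v], s ++ [pvCleaned v]) := by
  simp only [pvStepA]
  rw [if_neg (by simp [he, hc]),
    PySem.Set.add, if_neg (by simp [hc])]

-- adding c to the seen list refines the "unseen" filter by "different from c"
theorem pv_filter_append (s : List String) (c : String) (l : List String) :
    l.filter (fun x => !(PySem.Set.contains (s ++ [c]) x))
      = (l.filter (fun x => !(PySem.Set.contains s x))).filter (fun x => !(x == c)) := by
  rw [List.filter_filter]
  exact List.filter_congr (fun a _ => by
    by_cases h1 : a ∈ s <;> by_cases h2 : a = c <;> simp [h1, h2])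

-- Loop invariant: with seen and output both holding s, A's remaining fold equals B's
-- head-and-eliminate loop started at s on the cleaned, nonempty, not-yet-seen strings.
theorem pv_loop_eq (vs : List String) (s : List String) :
    (vs.foldl pvStepA (s, s)).2
      = pvLoopB s (((vs.map pvCleaned).filter (fun c => !(c == ""))).filter
          (fun c => !(PySem.Set.contains s c))) := by
  induction vs generalizing s with
  | nil => simp [pvLoopB]
  | cons v vs ih =>
    rw [List.foldl_cons, List.map_cons, List.filter_cons]
    by_cases he : pvCleaned v = ""
    · rw [pvStepA_skip s v (by simp [he]), ih]
      simp [he]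
    · by_cases hc : pvCleaned v ∈ s
      · rw [pvStepA_skip s v (by simp [hc]), ih]
        rw [if_pos (by simp [he] : (!(pvCleaned v == "")) = true), List.filter_cons,
          if_neg (by simp [hc])]
      · rw [pvStepA_add s v he hc, ih]
        rw [if_pos (by simp [he] : (!(pvCleaned v == "")) = true), List.filter_cons,
          if_pos (by simp [hc])]
        rw [pvLoopB]
        congr 1
        rw [List.filter_cons, if_neg (by simp), pv_filter_append]

-- ===== VERDICT =====
theorem normalize_body_classes_spec : Claim_equal_normalize_body_classes := by
  intro values _
  unfold Spec_normalize_body_classes normalize_body_classes normalize_body_classes_alt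
  rw [show (PySem.Set.empty : PySem.Set String) = ([] : List String) from rfl]
  rw [pv_loop_eq values []]
  simp [PySem.Set.contains]
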